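-- pv_equiv track=rewrite | github.com/BatuhanCakir/Sudoku-Solver | sudoku.py | check_box2
-- ===== SOURCE A (Python) =====
-- def check_box2(i,j,n,board):
--     i_start = int(i / 3) * 3
--     j_start = int(j / 3) * 3
--
--     lst_box = []
--     for i in range(3):
--         for j in range(3):
--             lst_box.append(board[i_start+i][j_start+j])
--     for m in range(9):
--         if(lst_box[m]== n):
--             return False
--     return True
-- ===== SOURCE B (Python) =====
-- def check_box2(i, j, n, board):
--     i_start = int(i / 3) * 3
--     j_start = int(j / 3) * 3
--     for r in range(3):
--         row = board[i_start + r]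
--         for c in range(3):
--             if row[j_start + c] == n:
--                 return False
--     return True
-- ===== Notes on version B (the rewrite author's own statement) =====
-- stated objective: simpler
-- what changed: B drops A's intermediate 9-element box list and its separate index scan, testing each cell inline in one fused nested loop with early return.
import Mathlib
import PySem

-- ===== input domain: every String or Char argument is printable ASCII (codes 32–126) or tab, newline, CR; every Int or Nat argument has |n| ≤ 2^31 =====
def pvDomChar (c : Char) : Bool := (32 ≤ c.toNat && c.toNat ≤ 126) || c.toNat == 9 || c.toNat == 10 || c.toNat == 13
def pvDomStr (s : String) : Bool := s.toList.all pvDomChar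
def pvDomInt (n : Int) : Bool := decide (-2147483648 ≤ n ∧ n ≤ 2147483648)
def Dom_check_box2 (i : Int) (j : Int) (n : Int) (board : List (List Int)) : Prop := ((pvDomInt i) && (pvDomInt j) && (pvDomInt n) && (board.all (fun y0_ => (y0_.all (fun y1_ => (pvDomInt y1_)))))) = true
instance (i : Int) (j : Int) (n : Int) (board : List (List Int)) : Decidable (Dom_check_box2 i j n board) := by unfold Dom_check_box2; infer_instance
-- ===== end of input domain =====

-- B fuses A's build-the-box-list-then-scan two-phase structure into one direct nested
-- pass with early return (objective: simpler; no materialized list).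

-- ===== PORT A =====
-- Python's int(i/3) truncates toward zero: Int.tdiv (exact for |i| ≤ 2^31, where the
-- float quotient never rounds across an integer).
def check_box2 (i : Int) (j : Int) (n : Int) (board : List (List Int)) : Bool :=
  let i_start := i.tdiv 3 * 3
  let j_start := j.tdiv 3 * 3
  -- lst_box built by appending board[i_start+i][j_start+j] over the two range(3) loops
  let lst_box : List Int :=
    (PySem.List.pyRange 0 3 1).foldl (fun acc r =>
      (PySem.List.pyRange 0 3 1).foldl (fun acc2 c =>
        acc2 ++ [PySem.List.pyGetD (PySem.List.pyGetD board (i_start + r) []) (j_start + c) 0]) acc) []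
  -- for m in range(9): if lst_box[m] == n: return False;  return True
  ! (PySem.List.pyRange 0 9 1).any (fun m => PySem.List.pyGetD lst_box m 0 == n)

-- ===== PORT B =====
def check_box2_alt (i : Int) (j : Int) (n : Int) (board : List (List Int)) : Bool :=
  let i_start := i.tdiv 3 * 3
  let j_start := j.tdiv 3 * 3
  ! (PySem.List.pyRange 0 3 1).any (fun r =>
      let row := PySem.List.pyGetD board (i_start + r) []
      (PySem.List.pyRange 0 3 1).any (fun c => PySem.List.pyGetD row (j_start + c) 0 == n))

-- ===== PRECONDITION & SPEC =====
-- Pre_ excludes exactly the inputs on which Python A raises IndexError: some of the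
-- nine box accesses board[i_start+r][j_start+c] is out of range.
def Pre_check_box2 (i : Int) (j : Int) (n : Int) (board : List (List Int)) : Prop :=
  ∀ r ∈ ([0, 1, 2] : List Int), ∀ c ∈ ([0, 1, 2] : List Int),
    ((PySem.List.pyGet? board (i.tdiv 3 * 3 + r)).bind
      (fun row => PySem.List.pyGet? row (j.tdiv 3 * 3 + c))).isSome
instance (i : Int) (j : Int) (n : Int) (board : List (List Int)) : Decidable (Pre_check_box2 i j n board) := by unfold Pre_check_box2; infer_instance

def pvWitness_check_box2 : Int × Int × Int × List (List Int) :=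
  (0, 0, 5, [[1, 2, 3], [4, 5, 6], [7, 8, 9]])

def Spec_check_box2 (i : Int) (j : Int) (n : Int) (board : List (List Int)) (out : Bool) : Prop := out = check_box2_alt i j n board
instance (i : Int) (j : Int) (n : Int) (board : List (List Int)) (out : Bool) : Decidable (Spec_check_box2 i j n board out) := by unfold Spec_check_box2; infer_instance

-- ===== CLAIM (what is proved, stated in full; the proofs are below) =====
def Claim_equal_check_box2 : Prop := ∀ (i : Int) (j : Int) (n : Int) (board : List (List Int)), Dom_check_box2 i j n board → Pre_check_box2 i j n board → Spec_check_box2 i j n board (check_box2 i j n board)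

-- ===== LEMMAS AND PROOFS =====
theorem pvWitness_ok :
    Dom_check_box2 pvWitness_check_box2.1 pvWitness_check_box2.2.1 pvWitness_check_box2.2.2.1 pvWitness_check_box2.2.2.2 ∧
    Pre_check_box2 pvWitness_check_box2.1 pvWitness_check_box2.2.1 pvWitness_check_box2.2.2.1 pvWitness_check_box2.2.2.2 := by
  decide

theorem pyRange3 : PySem.List.pyRange 0 3 1 = [0, 1, 2] := by decide
theorem pyRange9 : PySem.List.pyRange 0 9 1 = [0, 1, 2, 3, 4, 5, 6, 7, 8] := by decide

theorem box_eq (f : Int → Int → Int) (n : Int) :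
    (!(PySem.List.pyRange 0 9 1).any fun m =>
        PySem.List.pyGetD
          ((PySem.List.pyRange 0 3 1).foldl (fun acc r =>
            (PySem.List.pyRange 0 3 1).foldl (fun acc2 c => acc2 ++ [f r c]) acc) []) m 0 == n)
    = (!(PySem.List.pyRange 0 3 1).any fun r => (PySem.List.pyRange 0 3 1).any fun c => f r c == n) := by
  simp [pyRange3, pyRange9, List.foldl, List.any_cons, PySem.List.pyGetD,
    PySem.List.pyGet?, PySem.List.pyIdx?, Bool.or_assoc]

-- ===== VERDICT (by name: the statement is the Claim_ definition above) =====
theorem check_box2_spec : Claim_equal_check_box2 := by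
  intro i j n board _ _
  unfold Spec_check_box2 check_box2 check_box2_alt
  exact box_eq (fun r c =>
    PySem.List.pyGetD (PySem.List.pyGetD board (i.tdiv 3 * 3 + r) []) (j.tdiv 3 * 3 + c) 0) n
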